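-- pv_equiv track=rewrite | github.com/Esoxe/Hanoi | projet_hanoi.py | verifVictoire
-- ===== SOURCE A (Python) =====
-- def verifVictoire(plateau,n) :
--     for i in range(len(plateau)-1) :
--         if len(plateau[i]) !=0 :
--             return False
--     for i in range(len(plateau[-1])-1) :
--         if plateau[-1][i]<plateau[-1][i+1] :
--             return False
--     return True
-- ===== SOURCE B (Python) =====
-- def verifVictoire(plateau, n):
--     return all(len(p) == 0 for p in plateau[:-1]) and plateau[-1] == sorted(plateau[-1], reverse=True)
-- ===== Notes on version B (the rewrite author's own statement) =====
-- stated objective: simpler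
-- what changed: Replaces the index-loop over non-last pegs with an all() over plateau[:-1] and the adjacent-pair scan of the last peg with a sort-and-compare (plateau[-1] == sorted(plateau[-1], reverse=True)).
import Mathlib
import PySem

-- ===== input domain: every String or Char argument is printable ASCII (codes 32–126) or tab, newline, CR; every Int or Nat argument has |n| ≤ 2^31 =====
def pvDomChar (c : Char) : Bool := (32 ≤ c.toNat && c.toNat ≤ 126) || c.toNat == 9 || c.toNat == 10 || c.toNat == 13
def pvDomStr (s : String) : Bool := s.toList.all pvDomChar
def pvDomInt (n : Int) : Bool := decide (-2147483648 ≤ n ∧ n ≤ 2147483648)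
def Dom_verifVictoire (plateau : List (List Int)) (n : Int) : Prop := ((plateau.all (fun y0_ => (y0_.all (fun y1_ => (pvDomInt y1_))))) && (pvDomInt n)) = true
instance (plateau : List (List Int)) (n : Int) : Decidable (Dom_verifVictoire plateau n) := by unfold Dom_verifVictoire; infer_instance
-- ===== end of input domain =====

-- B replaces A's two index loops by an all() over plateau[:-1] and a sort-and-compare of the
-- last peg (simpler, not claimed faster). Neither program mutates its arguments.

-- ===== PORT A =====
-- literal port of A: two index loops with early return (encoded as `any` over the ranges)
def verifVictoire (plateau : List (List Int)) (n : Int) : Bool :=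
  if (PySem.List.pyRange 0 ((plateau.length : Int) - 1) 1).any
       (fun i => (PySem.List.pyGetD plateau i []).length != 0) then false
  else
    if (PySem.List.pyRange 0 (((PySem.List.pyGetD plateau (-1) []).length : Int) - 1) 1).any
         (fun i => decide (PySem.List.pyGetD (PySem.List.pyGetD plateau (-1) []) i 0
                           < PySem.List.pyGetD (PySem.List.pyGetD plateau (-1) []) (i + 1) 0)) then false
    else true

-- ===== PORT B =====
def verifVictoire_alt (plateau : List (List Int)) (n : Int) : Bool :=
  (PySem.List.slice plateau none (some (-1))).all (fun p => p.length == 0) &&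
  (PySem.List.pyGetD plateau (-1) []
     == PySem.List.sorted (PySem.List.pyGetD plateau (-1) []) (fun x => x) true)

-- ===== PRECONDITION & SPEC =====
-- Pre_ excludes only plateau = [], where both A and B raise IndexError on plateau[-1].
def Pre_verifVictoire (plateau : List (List Int)) (n : Int) : Prop := plateau ≠ []
instance (plateau : List (List Int)) (n : Int) : Decidable (Pre_verifVictoire plateau n) := by unfold Pre_verifVictoire; infer_instance
def pvWitness_verifVictoire : List (List Int) × Int := ([[], [3, 2, 1]], 3)

def Spec_verifVictoire (plateau : List (List Int)) (n : Int) (out : Bool) : Prop := out = verifVictoire_alt plateau n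
instance (plateau : List (List Int)) (n : Int) (out : Bool) : Decidable (Spec_verifVictoire plateau n out) := by unfold Spec_verifVictoire; infer_instance

-- ===== CLAIM (what is proved, stated in full; the proofs are below) =====
def Claim_equal_verifVictoire : Prop := ∀ (plateau : List (List Int)) (n : Int), Dom_verifVictoire plateau n → Pre_verifVictoire plateau n → Spec_verifVictoire plateau n (verifVictoire plateau n)

-- ===== LEMMAS AND PROOFS =====

-- an `any` over range(n) indexing into xs is `any` over the prefix take n
theorem any_pyRange_pyGetD {α : Type} (xs : List α) (d : α) (p : α → Bool) (m : Nat)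
    (hm : m ≤ xs.length) :
    (PySem.List.pyRange 0 (m : Int) 1).any (fun i => p (PySem.List.pyGetD xs i d))
      = (xs.take m).any p := by
  induction m with
  | zero => simp [PySem.List.pyRange_one_eq_nil]
  | succ k ih =>
    have hk : k ≤ xs.length := Nat.le_of_succ_le hm
    have hcast : ((k + 1 : Nat) : Int) = (k : Int) + 1 := by push_cast; ring
    rw [hcast, PySem.List.pyRange_one_succ_right (by positivity), List.any_append, ih hk,
      List.take_succ, List.any_append]
    have hget : PySem.List.pyGetD xs (k : Int) d = xs[k]'(by omega) :=
      PySem.List.pyGetD_eq_getElem xs d (by positivity) (by exact_mod_cast hm)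
    simp [hget, List.getElem?_eq_getElem (show k < xs.length by omega)]

-- adjacent non-increase on indices gives Pairwise ≥
theorem pairwise_ge_of_adjacent (l : List Int)
    (h : ∀ j : Nat, j + 1 < l.length → l[j + 1]! ≤ l[j]!) :
    l.Pairwise (fun a b => b ≤ a) := by
  rw [List.pairwise_iff_getElem]
  intro i j hi hj hij
  have step : ∀ k : Nat, ∀ hk : k < l.length, ∀ hik : i ≤ k, l[k] ≤ l[i] := by
    intro k
    induction k with
    | zero => intro hk hik; interval_cases i; simp
    | succ m ihm =>
      intro hk hik
      rcases Nat.lt_or_ge i (m + 1) with hlt | hge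
      · have hm : m < l.length := by omega
        have := h m hk
        rw [getElem!_pos l (m + 1) hk, getElem!_pos l m hm] at this
        exact le_trans this (ihm hm (by omega))
      · have : i = m + 1 := by omega
        subst this; simp
  exact step j hj (Nat.le_of_lt hij)

-- A's second loop finds no ascent iff the last peg equals its descending sort
theorem loop2_iff (l : List Int) :
    ((PySem.List.pyRange 0 ((l.length : Int) - 1) 1).any
       (fun i => decide (PySem.List.pyGetD l i 0 < PySem.List.pyGetD l (i + 1) 0)) = false)
      ↔ PySem.List.sorted l (fun x => x) true = l := by
  constructor
  · intro hno
    apply PySem.List.sorted_rev_eq_self_of_pairwise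
    apply pairwise_ge_of_adjacent
    intro j hj
    have hmem : (j : Int) ∈ PySem.List.pyRange 0 ((l.length : Int) - 1) 1 := by
      rw [PySem.List.mem_pyRange_one]; omega
    have := List.any_eq_false.mp hno _ hmem
    simp only [decide_eq_true_eq] at this
    have h1 : PySem.List.pyGetD l (j : Int) 0 = l[j]'(by omega) :=
      PySem.List.pyGetD_eq_getElem l 0 (by positivity) (by push_cast; omega)
    have h2 : PySem.List.pyGetD l ((j : Int) + 1) 0 = l[j + 1]'(by omega) := by
      have : ((j : Int) + 1) = ((j + 1 : Nat) : Int) := by push_cast; ring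
      rw [this]
      exact PySem.List.pyGetD_eq_getElem l 0 (by positivity) (by push_cast; omega)
    rw [h1, h2] at this
    rw [getElem!_pos l (j + 1) (by omega), getElem!_pos l j (by omega)]
    omega
  · intro hs
    have hpw : l.Pairwise (fun a b => b ≤ a) := by
      have := PySem.List.sorted_pairwise_rev l (fun x => x)
      rwa [hs] at this
    rw [List.any_eq_false]
    intro x hx
    rw [PySem.List.mem_pyRange_one] at hx
    simp only [decide_eq_true_eq, not_lt]
    have h1 : PySem.List.pyGetD l x 0 = l[x.toNat]'(by omega) :=
      PySem.List.pyGetD_eq_getElem l 0 (by omega) (by omega)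
    have h2 : PySem.List.pyGetD l (x + 1) 0 = l[x.toNat + 1]'(by omega) := by
      have hx1 : x + 1 = ((x.toNat + 1 : Nat) : Int) := by omega
      rw [hx1]
      exact PySem.List.pyGetD_eq_getElem l 0 (by positivity) (by omega)
    rw [h1, h2]
    exact List.pairwise_iff_getElem.mp hpw _ _ (by omega) (by omega) (by omega)

-- ===== VERDICT (by name: the statement is the Claim_ definition above) =====
theorem verifVictoire_spec : Claim_equal_verifVictoire := by
  intro plateau n _ hpre
  unfold Spec_verifVictoire verifVictoire verifVictoire_alt
  have hne : plateau ≠ [] := hpre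
  have hlen : 1 ≤ plateau.length := List.length_pos_of_ne_nil hne
  -- first loop vs first conjunct
  have hc1 : ((plateau.length : Int) - 1) = ((plateau.length - 1 : Nat) : Int) := by omega
  have l1 := any_pyRange_pyGetD plateau [] (fun p => p.length != 0) (plateau.length - 1) (by omega)
  rw [hc1, l1, ← List.dropLast_eq_take, PySem.List.slice_to_neg_one]
  -- all(len == 0) is the negation of any(len != 0)
  have hall : plateau.dropLast.all (fun p => p.length == 0)
      = !(plateau.dropLast.any (fun p => p.length != 0)) := by
    induction plateau.dropLast with
    | nil => rfl
    | cons a t ih => simp [List.all_cons, List.any_cons, ih, Bool.not_or, bne]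
  rw [hall]
  -- second loop vs sort-and-compare
  rcases Bool.eq_false_or_eq_true
      ((PySem.List.pyRange 0 (((PySem.List.pyGetD plateau (-1) []).length : Int) - 1) 1).any
        (fun i => decide (PySem.List.pyGetD (PySem.List.pyGetD plateau (-1) []) i 0
                          < PySem.List.pyGetD (PySem.List.pyGetD plateau (-1) []) (i + 1) 0))) with h2 | h2
  · have hs : PySem.List.sorted (PySem.List.pyGetD plateau (-1) []) (fun x => x) true
        ≠ PySem.List.pyGetD plateau (-1) [] := by
      intro heq
      have := (loop2_iff (PySem.List.pyGetD plateau (-1) [])).mpr heq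
      rw [this] at h2; exact Bool.noConfusion h2
    have hbeq : (PySem.List.pyGetD plateau (-1) []
        == PySem.List.sorted (PySem.List.pyGetD plateau (-1) []) (fun x => x) true) = false := by
      rw [beq_eq_false_iff_ne]; exact fun h => hs h.symm
    rw [h2, hbeq]
    cases hA : plateau.dropLast.any (fun p => p.length != 0) <;> simp [hA, Bool.and_false]
  · have hs := (loop2_iff (PySem.List.pyGetD plateau (-1) [])).mp h2
    have hbeq : (PySem.List.pyGetD plateau (-1) []
        == PySem.List.sorted (PySem.List.pyGetD plateau (-1) []) (fun x => x) true) = true := by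
      rw [beq_iff_eq]; exact hs.symm
    rw [h2, hbeq]
    cases hA : plateau.dropLast.any (fun p => p.length != 0) <;> simp [hA, Bool.and_false]
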